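-- pv_equiv track=rewrite | github.com/christosMil/leetcode-solutions | 1725numberOfRectanglesThatCanFormThe LargestSquare.py | countGoodRectangles
-- ===== SOURCE A (Python) =====
-- def countGoodRectangles(rectangles: list) -> int:
-- 	max_len = 0
-- 	max_count = 0
-- 	for i in rectangles:
-- 		if max_len < min(i):
-- 			max_len = min(i)
-- 			max_count = 1
-- 		elif max_len == min(i):
-- 			max_count += 1
-- 	return max_count
-- ===== SOURCE B (Python) =====
-- def countGoodRectangles(rectangles: list) -> int:
-- 	# Build the per-rectangle minimum sides, take the overall best (floored at 0,
-- 	# the "no good rectangle yet" baseline), and count how many mins reach it.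
-- 	mins = [min(r) for r in rectangles]
-- 	best = max([0] + mins)
-- 	return mins.count(best)
-- ===== Notes on version B (the rewrite author's own statement) =====
-- stated objective: simpler
-- what changed: A's single pass with a running max and a reset-on-increase counter is replaced by a build-then-max-then-count pipeline: materialize mins = [min(r) for r in rectangles], take best = max([0] + mins) (0 is A's baseline: nonpositive sides never form a counted square), and return mins.count(best); the counter/reset logic disappears.
import Mathlib
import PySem

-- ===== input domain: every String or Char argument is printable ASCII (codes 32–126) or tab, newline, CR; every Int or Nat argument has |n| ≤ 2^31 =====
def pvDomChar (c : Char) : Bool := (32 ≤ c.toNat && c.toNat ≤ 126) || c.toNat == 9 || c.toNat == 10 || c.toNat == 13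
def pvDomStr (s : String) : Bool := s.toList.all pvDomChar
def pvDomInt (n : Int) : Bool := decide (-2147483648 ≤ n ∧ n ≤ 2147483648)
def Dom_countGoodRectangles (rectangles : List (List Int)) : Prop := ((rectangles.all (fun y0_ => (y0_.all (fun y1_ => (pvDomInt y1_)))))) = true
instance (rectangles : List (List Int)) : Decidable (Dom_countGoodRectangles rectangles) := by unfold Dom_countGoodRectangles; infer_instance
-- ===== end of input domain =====

-- B replaces A's running-max-with-reset-counter pass by mins → max (floored at 0) → count; return values proved equal.
-- Pre_ excludes inputs containing an empty inner list, on which Python's min([]) raises ValueError in both A and B.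


-- ===== PORT A =====
-- one loop iteration: state (max_len, max_count); none propagates a ValueError from min([])
def cgrStep (st : Option (Int × Int)) (i : List Int) : Option (Int × Int) :=
  match st with
  | none => none
  | some (maxLen, maxCount) =>
    match PySem.List.min? i (fun x => x) with
    | none => none
    | some m =>
      if maxLen < m then some (m, 1)
      else if maxLen == m then some (maxLen, maxCount + 1)
      else some (maxLen, maxCount)

def countGoodRectangles (rectangles : List (List Int)) : Int :=
  match rectangles.foldl cgrStep (some (0, 0)) with
  | none => 0          -- unreachable under Pre_: Python raises ValueError here
  | some (_, maxCount) => maxCount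

-- ===== PORT B =====
def countGoodRectangles_alt (rectangles : List (List Int)) : Int :=
  match rectangles.mapM (fun r => PySem.List.min? r (fun x => x)) with
  | none => 0          -- unreachable under Pre_: Python raises ValueError here
  | some mins =>
    match PySem.List.max? ((0 : Int) :: mins) (fun x => x) with
    | none => 0        -- unreachable: the list is nonempty
    | some best => (PySem.List.count mins best : Int)

-- ===== PRECONDITION & SPEC =====
def Pre_countGoodRectangles (rectangles : List (List Int)) : Prop :=
  ∀ r ∈ rectangles, r ≠ []
instance (rectangles : List (List Int)) : Decidable (Pre_countGoodRectangles rectangles) := by unfold Pre_countGoodRectangles; infer_instance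

def pvWitness_countGoodRectangles : List (List Int) := [[5, 8], [3, 9], [5, 12], [16, 5]]

def Spec_countGoodRectangles (rectangles : List (List Int)) (out : Int) : Prop := out = countGoodRectangles_alt rectangles
instance (rectangles : List (List Int)) (out : Int) : Decidable (Spec_countGoodRectangles rectangles out) := by unfold Spec_countGoodRectangles; infer_instance

-- ===== CLAIM (what is proved, stated in full; the proofs are below) =====
def Claim_equal_countGoodRectangles : Prop := ∀ (rectangles : List (List Int)), Dom_countGoodRectangles rectangles → Pre_countGoodRectangles rectangles → Spec_countGoodRectangles rectangles (countGoodRectangles rectangles)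

-- ===== LEMMAS AND PROOFS =====

-- the plain (exception-free) loop body of A, on the per-rectangle minimum
def cgrStep2 (st : Int × Int) (m : Int) : Int × Int :=
  if st.1 < m then (m, 1)
  else if st.1 == m then (st.1, st.2 + 1)
  else st

-- the minimum of a nonempty rectangle
def minOf (r : List Int) : Int := (PySem.List.min? r (fun x => x)).getD 0

lemma min?_eq_minOf (r : List Int) (h : r ≠ []) :
    PySem.List.min? r (fun x => x) = some (minOf r) := by
  cases hm : PySem.List.min? r (fun x => x) with
  | none => exact absurd ((PySem.List.min?_eq_none_iff _ _).mp hm) h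
  | some v => simp [minOf, hm]

lemma foldA_eq (rs : List (List Int)) (h : ∀ r ∈ rs, r ≠ []) (st : Int × Int) :
    rs.foldl cgrStep (some st) = some ((rs.map minOf).foldl cgrStep2 st) := by
  induction rs generalizing st with
  | nil => simp
  | cons r t ih =>
    have hr := min?_eq_minOf r (h r (by simp))
    have ht : ∀ x ∈ t, x ≠ [] := fun x hx => h x (by simp [hx])
    simp only [List.foldl_cons, List.map_cons]
    have hstep : cgrStep (some st) r = some (cgrStep2 st (minOf r)) := by
      simp only [cgrStep, cgrStep2, hr]
      split_ifs <;> rfl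

    rw [hstep, ih ht]

lemma mapM_eq (rs : List (List Int)) (h : ∀ r ∈ rs, r ≠ []) :
    rs.mapM (fun r => PySem.List.min? r (fun x => x)) = some (rs.map minOf) := by
  induction rs with
  | nil => simp
  | cons r t ih =>
    have hr := min?_eq_minOf r (h r (by simp))
    have ht : ∀ x ∈ t, x ≠ [] := fun x hx => h x (by simp [hx])
    simp [List.mapM_cons, hr, ih ht]

-- invariant of A's loop over the list of minimums
lemma foldA_count (l : List Int) (m c : Int) :
    (l.foldl cgrStep2 (m, c)).2
      = (if l.foldl max m = m then c else 0) + (l.count (l.foldl max m) : Int) := by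
  induction l generalizing m c with
  | nil => simp
  | cons x t ih =>
    simp only [List.foldl_cons]
    by_cases h1 : m < x
    · have hmx : max m x = x := max_eq_right h1.le
      have hle : x ≤ t.foldl max x := (PySem.List.le_foldl_max t x).1
      have hne : ¬ t.foldl max x = m := by omega
      rw [show cgrStep2 (m, c) x = (x, 1) by simp [cgrStep2, h1]]
      rw [ih]
      simp only [hmx, List.count_cons, if_neg hne]
      by_cases h2 : t.foldl max x = x
      · simp [h2]
        omega
      · have : (x == t.foldl max x) = false := by simp; omega
        simp [h2, this]
    · have hmx : max m x = m := max_eq_left (by omega)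
      by_cases h2 : m = x
      · rw [show cgrStep2 (m, c) x = (m, c + 1) by simp [cgrStep2, h2]]
        rw [ih]
        simp only [hmx, List.count_cons]
        by_cases h3 : t.foldl max m = m
        · simp [h3, ← h2]
          omega
        · have hF : m ≤ t.foldl max m := (PySem.List.le_foldl_max t m).1
          have : (x == t.foldl max m) = false := by simp; omega
          simp [h3, this]
      · rw [show cgrStep2 (m, c) x = (m, c) by simp [cgrStep2, h1, h2]]
        rw [ih]
        have hF : m ≤ t.foldl max m := (PySem.List.le_foldl_max t m).1
        have : (x == t.foldl max m) = false := by simp; omega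
        simp only [hmx, List.count_cons, this]
        simp

-- ===== VERDICT (by name: the statement is the Claim_ definition above) =====
theorem countGoodRectangles_spec : Claim_equal_countGoodRectangles := by
  intro rs _ hpre
  unfold Spec_countGoodRectangles countGoodRectangles countGoodRectangles_alt
  rw [foldA_eq rs hpre (0, 0), mapM_eq rs hpre]
  simp only [PySem.List.max?_id_cons, foldA_count, PySem.List.count_eq]
  simp
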